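-- pv_equiv track=rewrite | github.com/linjoe2/terminal-teleprompter | teleprompter.py | split_lines_to_max_words
-- ===== SOURCE A (Python) =====
-- def split_lines_to_max_words(lines, max_words_per_line=5):
--     """
--     Splits each line into multiple lines with a maximum number of words per line.
--
--     :param lines: List of strings, original lines from the file.
--     :param max_words_per_line: Integer, maximum number of words allowed per line.
--     :return: List of strings, lines split into segments with the specified word limit.
--     """
--     wrapped_lines = []
--     for line in lines:
--         words = line.split()
--         while len(words) > max_words_per_line:
--             wrapped_lines.append(' '.join(words[:max_words_per_line]))
--             words = words[max_words_per_line:]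
--         wrapped_lines.append(' '.join(words))
--     return wrapped_lines
-- ===== SOURCE B (Python) =====
-- def split_lines_to_max_words(lines, max_words_per_line=5):
--     wrapped_lines = []
--     for line in lines:
--         chunk = []
--         count = 0
--         for word in line.split():
--             if count == max_words_per_line:
--                 wrapped_lines.append(' '.join(chunk))
--                 chunk = []
--                 count = 0
--             chunk.append(word)
--             count += 1
--         wrapped_lines.append(' '.join(chunk))
--     return wrapped_lines
-- ===== Notes on version B (the rewrite author's own statement) =====
-- stated objective: alternative
-- what changed: Replaces A's while-loop that repeatedly slices and rebuilds the word list of each line with a single word-by-word pass keeping a current-chunk buffer and count, flushed before adding a word when the count is full.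
import Mathlib
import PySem

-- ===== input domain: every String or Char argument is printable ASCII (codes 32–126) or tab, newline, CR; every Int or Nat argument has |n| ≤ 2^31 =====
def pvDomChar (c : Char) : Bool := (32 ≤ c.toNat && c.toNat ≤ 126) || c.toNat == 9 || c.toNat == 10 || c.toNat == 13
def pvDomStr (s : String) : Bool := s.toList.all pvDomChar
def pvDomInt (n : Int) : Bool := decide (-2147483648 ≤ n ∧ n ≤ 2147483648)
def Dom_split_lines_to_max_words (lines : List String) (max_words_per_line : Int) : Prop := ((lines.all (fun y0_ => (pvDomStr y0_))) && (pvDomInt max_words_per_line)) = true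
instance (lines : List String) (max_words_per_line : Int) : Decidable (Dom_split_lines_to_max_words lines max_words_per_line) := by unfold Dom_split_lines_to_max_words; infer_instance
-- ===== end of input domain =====

-- One-line summary: B wraps each line in a single word-by-word pass with a flush-before-add
-- chunk buffer instead of A's while-loop that repeatedly slices the word list (alternative decomposition).


-- ===== PORT A =====
-- A's while-loop; the Nat fuel (initial words count) is only a totality guard: when
-- 1 ≤ max_words_per_line each iteration drops at least one word, so the fuel is never exhausted.
def pvAWhile : Nat → List String → Int → List String → List String
  | 0, words, _, acc => acc ++ [PySem.Str.join " " words]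
  | f + 1, words, k, acc =>
    if (words.length : Int) > k then
      pvAWhile f (PySem.List.slice words (some k) none) k
        (acc ++ [PySem.Str.join " " (PySem.List.slice words none (some k))])
    else acc ++ [PySem.Str.join " " words]

def split_lines_to_max_words (lines : List String) (max_words_per_line : Int) : List String :=
  lines.foldl (fun wrapped_lines line =>
    pvAWhile (PySem.Str.split₀ line).length (PySem.Str.split₀ line) max_words_per_line wrapped_lines) []

-- ===== PORT B =====
-- one step of B's inner word loop: flush the chunk before adding the word when the count is full
def pvBStep (k : Int) (st : List String × List String × Int) (w : String) : List String × List String × Int :=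
  if st.2.2 == k then (st.1 ++ [PySem.Str.join " " st.2.1], [w], 1)
  else (st.1, st.2.1 ++ [w], st.2.2 + 1)

def pvBLine (k : Int) (wrapped_lines : List String) (line : String) : List String :=
  let st := (PySem.Str.split₀ line).foldl (pvBStep k) (wrapped_lines, ([] : List String), (0 : Int))
  st.1 ++ [PySem.Str.join " " st.2.1]

def split_lines_to_max_words_alt (lines : List String) (max_words_per_line : Int) : List String :=
  lines.foldl (pvBLine max_words_per_line) []

-- ===== PRECONDITION & SPEC =====
-- Pre_ excludes exactly the inputs on which A never returns: with max_words_per_line < 0 the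
-- while-condition is always true (A loops forever on any line, even a whitespace one), and with
-- max_words_per_line = 0 it loops forever on any line containing a word; A returns on every
-- admitted input.  (The empty lines list and the 'k = 0, all lines whitespace-only' corner,
-- where A does return, are kept inside Pre_.)
def Pre_split_lines_to_max_words (lines : List String) (max_words_per_line : Int) : Prop :=
  1 ≤ max_words_per_line ∨ lines = [] ∨
    (max_words_per_line = 0 ∧ ∀ line ∈ lines, PySem.Str.split₀ line = [])
instance (lines : List String) (max_words_per_line : Int) : Decidable (Pre_split_lines_to_max_words lines max_words_per_line) := by unfold Pre_split_lines_to_max_words; infer_instance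

def pvWitness_split_lines_to_max_words : List String × Int := (["one two three four", "", "x"], 2)

def Spec_split_lines_to_max_words (lines : List String) (max_words_per_line : Int) (out : List String) : Prop := out = split_lines_to_max_words_alt lines max_words_per_line
instance (lines : List String) (max_words_per_line : Int) (out : List String) : Decidable (Spec_split_lines_to_max_words lines max_words_per_line out) := by unfold Spec_split_lines_to_max_words; infer_instance

-- ===== CLAIM (what is proved, stated in full; the proofs are below) =====
def Claim_equal_split_lines_to_max_words : Prop := ∀ (lines : List String) (max_words_per_line : Int), Dom_split_lines_to_max_words lines max_words_per_line → Pre_split_lines_to_max_words lines max_words_per_line → Spec_split_lines_to_max_words lines max_words_per_line (split_lines_to_max_words lines max_words_per_line)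

-- ===== LEMMAS AND PROOFS =====

-- B's inner loop never flushes while the count stays within the limit
theorem pvBStep_noflush (k : Int) (ws : List String) : ∀ (out cur : List String) (c : Int),
    c + ws.length ≤ k →
    ws.foldl (pvBStep k) (out, cur, c) = (out, cur ++ ws, c + ws.length) := by
  induction ws with
  | nil => intro out cur c _; simp
  | cons w rest ih =>
    intro out cur c h
    have hlt : c < k := by
      have := rest.length; simp [List.length_cons] at h; omega
    have hne : (c == k) = false := by simp; omega
    simp only [List.foldl_cons, pvBStep, hne, Bool.false_eq_true, if_false]
    rw [ih (out) (cur ++ [w]) (c + 1) (by simp at h ⊢; omega)]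
    simp; omega

-- the per-line equivalence: A's slicing while-loop equals B's word-by-word pass (k ≥ 1)
theorem pvLine_eq (k : Int) (hk : 1 ≤ k) : ∀ (fuel : Nat) (words : List String) (acc : List String),
    words.length ≤ fuel →
    pvAWhile fuel words k acc =
      (fun st : List String × List String × Int => st.1 ++ [PySem.Str.join " " st.2.1])
        (words.foldl (pvBStep k) (acc, ([] : List String), (0 : Int))) := by
  intro fuel
  induction fuel with
  | zero =>
    intro words acc h
    have : words = [] := List.eq_nil_of_length_eq_zero (Nat.le_zero.mp h)
    subst this; simp [pvAWhile]
  | succ f ih =>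
    intro words acc h
    by_cases hgt : (words.length : Int) > k
    · -- loop iteration
      have hk0 : (0:Int) ≤ k := by omega
      have hklen : k.toNat < words.length := by omega
      rw [pvAWhile, if_pos hgt, PySem.List.slice_from words hk0, PySem.List.slice_to words hk0]
      have hdlen : (List.drop k.toNat words).length ≤ f := by simp; omega
      rw [ih _ _ hdlen]
      conv_rhs => rw [← List.take_append_drop k.toNat words, List.foldl_append]
      have htlen : (List.take k.toNat words).length = k.toNat := by simp; omega
      rw [pvBStep_noflush k _ acc [] 0 (by rw [htlen]; omega)]
      obtain ⟨w, rest, hw⟩ := List.exists_cons_of_ne_nil (l := List.drop k.toNat words)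
        (by intro hnil; have := congrArg List.length hnil; simp at this; omega)
      rw [hw]
      have hck : (((0:Int) + ↑(List.take k.toNat words).length) == k) = true := by
        simp [htlen]; omega
      have hc0 : (((0:Int)) == k) = false := by simp; omega
      simp only [List.foldl_cons, pvBStep, hck, hc0, Bool.false_eq_true, if_false, if_true]
      simp
    · -- loop exits: no flush ever happens
      rw [pvAWhile, if_neg hgt]
      rw [pvBStep_noflush k words acc [] 0 (by omega)]
      simp

theorem pvFoldA_eq_B (k : Int) (hk : 1 ≤ k) : ∀ (lines acc : List String),
    lines.foldl (fun wrapped_lines line =>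
      pvAWhile (PySem.Str.split₀ line).length (PySem.Str.split₀ line) k wrapped_lines) acc =
    lines.foldl (pvBLine k) acc := by
  intro lines
  induction lines with
  | nil => intro acc; rfl
  | cons l rest ih =>
    intro acc
    simp only [List.foldl_cons]
    rw [pvLine_eq k hk _ _ acc (le_refl _), ih]
    rfl

theorem pvFoldA_eq_B0 : ∀ (lines acc : List String), (∀ l ∈ lines, PySem.Str.split₀ l = []) →
    lines.foldl (fun wrapped_lines line =>
      pvAWhile (PySem.Str.split₀ line).length (PySem.Str.split₀ line) 0 wrapped_lines) acc =
    lines.foldl (pvBLine 0) acc := by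
  intro lines
  induction lines with
  | nil => intro acc _; rfl
  | cons l rest ih =>
    intro acc h
    have hl : PySem.Str.split₀ l = [] := h l (by simp)
    simp only [List.foldl_cons, hl]
    rw [ih _ (fun x hx => h x (by simp [hx]))]
    congr 1
    simp [pvAWhile, pvBLine, hl]

-- ===== VERDICT (by name: the statement is the Claim_ definition above) =====
theorem split_lines_to_max_words_spec : Claim_equal_split_lines_to_max_words := by
  intro lines k _ hpre
  unfold Spec_split_lines_to_max_words split_lines_to_max_words split_lines_to_max_words_alt
  rcases hpre with hk | hnil | ⟨hk0, hws⟩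
  · rw [pvFoldA_eq_B k hk]
  · subst hnil; rfl
  · subst hk0; rw [pvFoldA_eq_B0 lines [] hws]
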